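-- pv_equiv track=rewrite | github.com/Jaspitta/secondbrain | 1 - Projects/M269-25J/book-r1/python/13_Divide/13_2_decrease_half.py | power_by_half
-- ===== SOURCE A (Python) =====
-- def power_by_half(base: int, exponent: int) -> int:
--     """Return the base to the power of the exponent.
--
--     Preconditions: exponent >= 0
--     """
--     if exponent == 0:
--         return 1
--     else:
--         subsolution = power_by_half(base, exponent // 2)
--         if exponent % 2 == 0:
--             return subsolution * subsolution
--         else:
--             return subsolution * subsolution * base
-- ===== SOURCE B (Python) =====
-- def power_by_half(base: int, exponent: int) -> int:
--     """Return the base to the power of the exponent.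
--
--     Preconditions: exponent >= 0
--     """
--     if exponent < 0:
--         raise ValueError("exponent must be non-negative")
--     result = 1
--     p = base
--     while exponent > 0:
--         if exponent % 2 == 1:
--             result *= p
--         p *= p
--         exponent //= 2
--     return result
-- ===== Notes on version B (the rewrite author's own statement) =====
-- stated objective: alternative
-- what changed: Replaces top-down recursive squaring with an iterative bottom-up exponentiation-by-squaring loop (result accumulator over the exponent's low bits).
import Mathlib
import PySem

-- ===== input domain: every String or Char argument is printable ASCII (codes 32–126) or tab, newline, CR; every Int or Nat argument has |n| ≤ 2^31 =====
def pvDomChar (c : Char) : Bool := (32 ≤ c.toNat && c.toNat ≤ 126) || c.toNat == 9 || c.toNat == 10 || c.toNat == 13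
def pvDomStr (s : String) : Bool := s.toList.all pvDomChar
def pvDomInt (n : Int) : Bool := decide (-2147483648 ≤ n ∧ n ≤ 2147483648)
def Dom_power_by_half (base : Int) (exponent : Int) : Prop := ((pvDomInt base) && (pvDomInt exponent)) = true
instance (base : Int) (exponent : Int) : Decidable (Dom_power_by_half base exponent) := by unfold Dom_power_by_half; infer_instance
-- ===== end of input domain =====

-- B replaces A's top-down recursive squaring with an iterative bottom-up square-and-multiply loop.
-- A mutates nothing; equivalence is about the return value on exponent ≥ 0 (both raise otherwise).

-- ===== PORT A =====
-- A's recursion 'power_by_half(base, exponent // 2)' decreases only for exponent > 0; the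
-- fuel (exponent.toNat + 1) is a totality guard only — it suffices on every input of Pre_.
def pbhGoA (base : Int) (exponent : Int) : Nat → Int
  | 0 => 1
  | f + 1 =>
    if exponent = 0 then 1
    else
      let subsolution := pbhGoA base (PySem.Int.floordiv exponent 2) f
      if PySem.Int.mod exponent 2 = 0 then subsolution * subsolution
      else subsolution * subsolution * base

def power_by_half (base : Int) (exponent : Int) : Int :=
  pbhGoA base exponent (exponent.toNat + 1)

-- ===== PORT B =====
-- B raises ValueError on exponent < 0 (outside Pre_); the guarded loop below is its
-- transliteration on the non-raising inputs.
def pbhLoop (result : Int) (p : Int) (e : Int) : Int :=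
  if h : 0 < e then
    pbhLoop (if PySem.Int.mod e 2 = 1 then result * p else result) (p * p)
      (PySem.Int.floordiv e 2)
  else result
termination_by e.toNat
decreasing_by
  rw [PySem.Int.floordiv_eq_ediv_of_pos (by omega)]
  omega

def power_by_half_alt (base : Int) (exponent : Int) : Int :=
  pbhLoop 1 base exponent

-- ===== PRECONDITION & SPEC =====
-- On exponent < 0 A recurses forever (RecursionError) and B raises ValueError,
-- matching the documented precondition 'exponent >= 0'.
def Pre_power_by_half (base : Int) (exponent : Int) : Prop := 0 ≤ exponent
instance (base : Int) (exponent : Int) : Decidable (Pre_power_by_half base exponent) := by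
  unfold Pre_power_by_half; infer_instance
def pvWitness_power_by_half : Int × Int := (3, 10)

def Spec_power_by_half (base : Int) (exponent : Int) (out : Int) : Prop := out = power_by_half_alt base exponent
instance (base : Int) (exponent : Int) (out : Int) : Decidable (Spec_power_by_half base exponent out) := by unfold Spec_power_by_half; infer_instance

-- ===== CLAIM (what is proved, stated in full; the proofs are below) =====
def Claim_equal_power_by_half : Prop := ∀ (base : Int) (exponent : Int), Dom_power_by_half base exponent → Pre_power_by_half base exponent → Spec_power_by_half base exponent (power_by_half base exponent)

-- ===== LEMMAS AND PROOFS =====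

-- A's recursion computes base ^ n whenever the fuel exceeds n.
theorem pbhGoA_eq_pow (base : Int) : ∀ (f : Nat) (n : Nat), n < f →
    pbhGoA base (n : Int) f = base ^ n := by
  intro f
  induction f with
  | zero => intro n h; omega
  | succ f ih =>
    intro n h
    by_cases hn : n = 0
    · subst hn; simp [pbhGoA]
    · have hn0 : (n : Int) ≠ 0 := by exact_mod_cast hn
      rw [pbhGoA]
      simp only [hn0, if_false]
      rw [show PySem.Int.floordiv (n : Int) 2 = ((n / 2 : Nat) : Int) from
            PySem.Int.floordiv_natCast n 2,
          show PySem.Int.mod (n : Int) 2 = ((n % 2 : Nat) : Int) from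
            PySem.Int.mod_natCast n 2,
          ih (n / 2) (by omega)]
      by_cases hpar : n % 2 = 0
      · have : ((n % 2 : Nat) : Int) = 0 := by exact_mod_cast hpar
        rw [if_pos this, ← pow_add]
        congr 1; omega
      · have : ((n % 2 : Nat) : Int) ≠ 0 := by
          intro hc; exact hpar (by exact_mod_cast hc)
        rw [if_neg this, ← pow_add]
        have : base ^ (n / 2 + n / 2) * base = base ^ (n / 2 + n / 2 + 1) := by ring
        rw [this]; congr 1; omega

-- B's loop invariant: pbhLoop r p n = r * p ^ n.
theorem pbhLoop_eq_pow : ∀ (n : Nat) (r p : Int), pbhLoop r p (n : Int) = r * p ^ n := by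
  intro n
  induction n using Nat.strong_induction_on with
  | _ n ih =>
    intro r p
    by_cases hn : n = 0
    · subst hn; rw [pbhLoop]; simp
    · have hpos : (0 : Int) < (n : Int) := by exact_mod_cast Nat.pos_of_ne_zero hn
      rw [pbhLoop, dif_pos hpos,
          show PySem.Int.floordiv (n : Int) 2 = ((n / 2 : Nat) : Int) from
            PySem.Int.floordiv_natCast n 2,
          show PySem.Int.mod (n : Int) 2 = ((n % 2 : Nat) : Int) from
            PySem.Int.mod_natCast n 2,
          ih (n / 2) (by omega)]
      by_cases hpar : n % 2 = 1
      · have h1 : ((n % 2 : Nat) : Int) = 1 := by exact_mod_cast hpar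
        have hp : p ^ (n / 2) * p ^ (n / 2) * p = p ^ n := by
          rw [← pow_add, ← pow_succ]; congr 1; omega
        rw [if_pos h1, mul_pow, ← hp]; ring
      · have h1 : ((n % 2 : Nat) : Int) ≠ 1 := by
          intro hc; exact hpar (by exact_mod_cast hc)
        have hp : p ^ (n / 2) * p ^ (n / 2) = p ^ n := by
          rw [← pow_add]; congr 1; omega
        rw [if_neg h1, mul_pow, hp]

-- ===== VERDICT (by name: the statement is the Claim_ definition above) =====
theorem power_by_half_spec : Claim_equal_power_by_half := by
  intro base exponent _ hpre
  unfold Spec_power_by_half power_by_half power_by_half_alt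
  obtain ⟨n, rfl⟩ : ∃ n : Nat, exponent = (n : Int) :=
    ⟨exponent.toNat, (Int.toNat_of_nonneg hpre).symm⟩
  simp only [Int.toNat_natCast]
  rw [pbhGoA_eq_pow base (n + 1) n (by omega), pbhLoop_eq_pow n 1 base, one_mul]
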